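-- pv_equiv track=rewrite | github.com/irakhimianov/codewars-python | 7kyu/Char_code_calculation.py | calc
-- ===== SOURCE A (Python) =====
-- def calc(sentence):
--     total1 = ''
--     total2 = ''
--     for charact in sentence:
--         total1 += str(ord(charact))
--         if '7' in total1:
--             total2 = total1.replace('7', '1')
--         else:
--             total2 = total1[:]
--     return (sum([int(i) for i in total1])) - (sum([int(i) for i in total2]))
-- ===== SOURCE B (Python) =====
-- def calc(sentence):
--     total = 0
--     for charact in sentence:
--         total += str(ord(charact)).count('7')
--     return 6 * total
-- ===== Notes on version B (the rewrite author's own statement) =====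
-- stated objective: simpler
-- what changed: Instead of accumulating two growing digit strings (rebuilding the 7->1 replacement after every character) and summing both at the end, B only counts '7' digits in each ord-value and returns 6 times that count, using the identity digitsum(s) - digitsum(s.replace('7','1')) = 6 * s.count('7').
import Mathlib
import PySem

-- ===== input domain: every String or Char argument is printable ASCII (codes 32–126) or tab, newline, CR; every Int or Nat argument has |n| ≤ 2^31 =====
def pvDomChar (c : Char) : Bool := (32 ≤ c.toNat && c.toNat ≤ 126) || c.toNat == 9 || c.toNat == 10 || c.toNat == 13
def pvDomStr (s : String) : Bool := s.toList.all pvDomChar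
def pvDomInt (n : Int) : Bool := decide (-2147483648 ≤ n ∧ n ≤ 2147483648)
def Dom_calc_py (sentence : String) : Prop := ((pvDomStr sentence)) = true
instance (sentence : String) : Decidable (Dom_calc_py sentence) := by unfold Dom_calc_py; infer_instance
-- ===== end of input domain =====

-- B replaces A's two growing digit-string accumulators (with the 7→1 replacement rebuilt after
-- every character and both strings digit-summed at the end) by a single running count of '7'
-- digits, returning 6 * count.

-- ===== PORT A =====
-- int(i) for a single char i of total1 → (PySem.Int.ofChars? [i]).getD 0; exact here because
-- total1 consists only of decimal digits (it is a concatenation of str(ord(c)) values).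
def calc_py (sentence : String) : Int :=
  let st := sentence.toList.foldl
    (fun (acc : List Char × List Char) charact =>
      let total1 := acc.1 ++ PySem.Int.toChars (charact.toNat : Int)
      let total2 := if PySem.Chars.isIn ['7'] total1
                    then PySem.Chars.replace total1 ['7'] ['1']
                    else PySem.Chars.slice total1 none none
      (total1, total2))
    ([], [])
  (st.1.map (fun i => (PySem.Int.ofChars? [i]).getD 0)).sum
    - (st.2.map (fun i => (PySem.Int.ofChars? [i]).getD 0)).sum

-- ===== PORT B =====
def calc_py_alt (sentence : String) : Int :=
  let total := sentence.toList.foldl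
    (fun (acc : Nat) charact =>
      acc + PySem.Chars.count (PySem.Int.toChars (charact.toNat : Int)) ['7'])
    0
  6 * (total : Int)

-- ===== PRECONDITION & SPEC =====
def Spec_calc_py (sentence : String) (out : Int) : Prop := out = calc_py_alt sentence
instance (sentence : String) (out : Int) : Decidable (Spec_calc_py sentence out) := by unfold Spec_calc_py; infer_instance

-- ===== CLAIM (what is proved, stated in full; the proofs are below) =====
def Claim_equal_calc_py : Prop := ∀ (sentence : String), Dom_calc_py sentence → Spec_calc_py sentence (calc_py sentence)

-- ===== LEMMAS AND PROOFS =====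

-- 7→1 digit substitution, single-digit value, and the concatenation of ord-value digits
def pvRepl (c : Char) : Char := if c = '7' then '1' else c
def pvDval (c : Char) : Int := (PySem.Int.ofChars? [c]).getD 0
def pvCat (l : List Char) : List Char := l.flatMap (fun c => PySem.Int.toChars (c.toNat : Int))

lemma pv_replace_go (fuel : Nat) (l acc : List Char) (h : l.length ≤ fuel) :
    PySem.Chars.replace.go ['7'] ['1'] fuel l acc = acc.reverse ++ l.map pvRepl := by
  induction fuel generalizing l acc with
  | zero =>
    cases l with
    | nil => simp [PySem.Chars.replace.go]
    | cons c t => simp at h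
  | succ n ih =>
    cases l with
    | nil => simp [PySem.Chars.replace.go]
    | cons c t =>
      simp only [List.length_cons] at h
      by_cases hc : c = '7'
      · subst hc
        have hstep : PySem.Chars.replace.go ['7'] ['1'] (n + 1) ('7' :: t) acc
            = PySem.Chars.replace.go ['7'] ['1'] n t ('1' :: acc) := by
          simp [PySem.Chars.replace.go, List.isPrefixOf]
        rw [hstep, ih t _ (by omega)]
        simp [pvRepl]
      · have hc' : ¬ ('7' = c) := fun h' => hc h'.symm
        have hstep : PySem.Chars.replace.go ['7'] ['1'] (n + 1) (c :: t) acc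
            = PySem.Chars.replace.go ['7'] ['1'] n t (c :: acc) := by
          simp [PySem.Chars.replace.go, List.isPrefixOf, hc']
        rw [hstep, ih t _ (by omega)]
        simp [pvRepl, hc]

lemma pv_replace_single (t : List Char) :
    PySem.Chars.replace t ['7'] ['1'] = t.map pvRepl := by
  simp only [PySem.Chars.replace]
  rw [if_neg (by decide)]
  simpa using pv_replace_go t.length t [] le_rfl

lemma pv_count_go (fuel : Nat) (l : List Char) (acc : Nat) (h : l.length ≤ fuel) :
    PySem.Chars.count.go ['7'] fuel l acc = acc + l.count '7' := by
  induction fuel generalizing l acc with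
  | zero =>
    cases l with
    | nil => simp [PySem.Chars.count.go]
    | cons c t => simp at h
  | succ n ih =>
    cases l with
    | nil => simp [PySem.Chars.count.go]
    | cons c t =>
      simp only [List.length_cons] at h
      by_cases hc : c = '7'
      · subst hc
        have hstep : PySem.Chars.count.go ['7'] (n + 1) ('7' :: t) acc
            = PySem.Chars.count.go ['7'] n t (acc + 1) := by
          simp [PySem.Chars.count.go, List.isPrefixOf]
        rw [hstep, ih t _ (by omega), List.count_cons_self]
        omega
      · have hc' : ¬ ('7' = c) := fun h' => hc h'.symm
        have hstep : PySem.Chars.count.go ['7'] (n + 1) (c :: t) acc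
            = PySem.Chars.count.go ['7'] n t acc := by
          simp [PySem.Chars.count.go, List.isPrefixOf, hc']
        rw [hstep, ih t _ (by omega)]
        simp [hc]

lemma pv_count_single (t : List Char) :
    PySem.Chars.count t ['7'] = t.count '7' := by
  simp only [PySem.Chars.count]
  rw [if_neg (by decide)]
  simpa using pv_count_go t.length t 0 le_rfl

-- A's per-step recomputed total2, as a function of total1
def pvG (t : List Char) : List Char :=
  if PySem.Chars.isIn ['7'] t then PySem.Chars.replace t ['7'] ['1']
  else PySem.Chars.slice t none none

lemma pv_foldA (l : List Char) (t1 t2 : List Char) :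
    l.foldl (fun (acc : List Char × List Char) charact =>
      let total1 := acc.1 ++ PySem.Int.toChars (charact.toNat : Int)
      let total2 := if PySem.Chars.isIn ['7'] total1
                    then PySem.Chars.replace total1 ['7'] ['1']
                    else PySem.Chars.slice total1 none none
      (total1, total2)) (t1, t2)
    = (t1 ++ pvCat l, if l = [] then t2 else pvG (t1 ++ pvCat l)) := by
  induction l generalizing t1 t2 with
  | nil => simp [pvCat]
  | cons c t ih =>
    simp only [List.foldl_cons, ih, pvCat, List.flatMap_cons, List.append_assoc]
    cases t with
    | nil => simp [pvG]
    | cons d u => simp [pvG]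

lemma pv_map_repl_of_no7 (t : List Char) (h7 : '7' ∉ t) : t.map pvRepl = t := by
  induction t with
  | nil => rfl
  | cons c u ih =>
    simp only [List.mem_cons, not_or] at h7
    have hr : pvRepl c = c := by
      unfold pvRepl
      rw [if_neg (fun h' => h7.1 h'.symm)]
    simp [hr, ih h7.2]

-- the final total2 equals the 7→1 substitution of total1 (slice copy when no '7' present)
lemma pv_G_eq (t : List Char) : pvG t = t.map pvRepl := by
  unfold pvG
  by_cases h : PySem.Chars.isIn ['7'] t = true
  · rw [if_pos h, pv_replace_single]
  · rw [if_neg h]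
    have h7 : '7' ∉ t := by
      have := (PySem.Chars.isIn_eq_false_iff ['7'] t).mp (by simpa using h)
      simpa [List.singleton_infix_iff] using this
    rw [pv_map_repl_of_no7 t h7]
    simp [pysem]

-- digit-sum difference is 6 per '7' digit
lemma pv_sum_diff (t : List Char) :
    (t.map pvDval).sum - ((t.map pvRepl).map pvDval).sum = 6 * (t.count '7' : Int) := by
  induction t with
  | nil => simp
  | cons c u ih =>
    by_cases hc : c = '7'
    · subst hc
      simp only [List.map_cons, List.sum_cons, List.count_cons_self]
      have h7 : pvDval '7' = 7 := by decide
      have h1 : pvDval (pvRepl '7') = 1 := by decide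
      rw [h7, h1]
      push_cast
      push_cast at ih
      omega
    · simp only [List.map_cons, List.sum_cons]
      have hcnt : List.count '7' (c :: u) = List.count '7' u := by
        simp [hc]
      have hr : pvRepl c = c := by simp [pvRepl, hc]
      rw [hcnt, hr]
      omega

lemma pv_foldl_count (l : List Char) (a : Nat) :
    l.foldl (fun (acc : Nat) c => acc + (PySem.Int.toChars (c.toNat : Int)).count '7') a
      = a + (pvCat l).count '7' := by
  induction l generalizing a with
  | nil => simp [pvCat]
  | cons c t ih => simp [pvCat, ih, List.count_append]; omega

-- ===== VERDICT (by name: the statement is the Claim_ definition above) =====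
theorem calc_py_spec : Claim_equal_calc_py := by
  intro sentence _
  unfold Spec_calc_py calc_py calc_py_alt
  rw [pv_foldA]
  have hG : (if sentence.toList = [] then ([] : List Char)
      else pvG ([] ++ pvCat sentence.toList)) = pvG ([] ++ pvCat sentence.toList) := by
    split
    · rename_i h
      simp [h, pvCat, pvG, pysem]
    · rfl
  rw [hG]
  simp only [List.nil_append, pv_G_eq]
  simp only [pv_count_single, pv_foldl_count]
  have hsd := pv_sum_diff (pvCat sentence.toList)
  have hfun : (fun i => (PySem.Int.ofChars? [i]).getD 0) = pvDval := rfl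
  rw [hfun]
  omega
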